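-- pv_equiv track=rewrite | github.com/TieuLongPhan/SynKit | synkit/CRN/Props/petri.py | _minimal_sets
-- ===== SOURCE A (Python) =====
-- from typing import Any, Dict, List, Optional, Set, Tuple
-- from typing import Any, Dict, List, Mapping, Optional, Set, Tuple
--
-- def _minimal_sets(candidates: List[Set[int]]) -> List[Set[int]]:
--     """
--     Return inclusion-minimal sets from a list of integer subsets.
--
--     A set :math:`S` is kept if it is not a strict superset of any other
--     candidate already in the output.
--
--     :param candidates: Candidate index sets.
--     :type candidates: list[set[int]]
--     :returns: List of inclusion-minimal index sets.
--     :rtype: list[set[int]]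
--
--     :reference: Standard minimality filtering in Petri net analysis.
--     """
--     out: List[Set[int]] = []
--     for S in candidates:
--         if any(T.issubset(S) for T in out):
--             continue
--         # remove supersets of S already in out
--         out = [T for T in out if not S.issubset(T)]
--         out.append(S)
--     return out
-- ===== SOURCE B (Python) =====
-- from typing import List, Set
--
--
-- def _minimal_sets(candidates: List[Set[int]]) -> List[Set[int]]:
--     """Stateless filter: keep S iff no candidate is a strict subset of it,
--     deduplicating repeats by first occurrence."""
--     result: List[Set[int]] = []
--     for S in candidates:
--         if any(T < S for T in candidates):
--             continue
--         if S in result: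
--             continue
--         result.append(S)
--     return result
-- ===== Notes on version B (the rewrite author's own statement) =====
-- stated objective: simpler
-- what changed: Replaced the incremental add-and-prune accumulator (skip if a kept subset exists, then remove kept supersets) by a stateless global filter: keep S iff no candidate anywhere in the list is a strict subset of S, deduplicating by membership in the result.
import Mathlib
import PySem

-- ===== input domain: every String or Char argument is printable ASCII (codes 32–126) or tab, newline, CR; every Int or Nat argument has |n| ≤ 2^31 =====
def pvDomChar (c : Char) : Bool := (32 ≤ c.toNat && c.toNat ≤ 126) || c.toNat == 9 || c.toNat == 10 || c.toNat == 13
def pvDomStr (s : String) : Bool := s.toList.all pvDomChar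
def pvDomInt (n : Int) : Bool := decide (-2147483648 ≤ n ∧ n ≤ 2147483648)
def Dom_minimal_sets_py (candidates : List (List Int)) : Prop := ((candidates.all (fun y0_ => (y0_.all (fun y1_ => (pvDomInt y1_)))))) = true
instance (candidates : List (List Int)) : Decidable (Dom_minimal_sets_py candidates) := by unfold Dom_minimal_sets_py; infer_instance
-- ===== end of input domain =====

-- B replaces A's incremental add-and-prune accumulator by a stateless global
-- strict-subset filter with first-occurrence dedup (objective: simpler).
-- Inner lists represent Python sets: subset/equality are set-wise.

-- ===== PORT A =====
-- T.issubset(S)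
def subsetB (T S : List Int) : Bool := T.all (fun x => S.contains x)

-- one iteration of A's loop body on the accumulator `out`
def aStep (out : List (List Int)) (S : List Int) : List (List Int) :=
  if out.any (fun T => subsetB T S) then out
  else (out.filter (fun T => !subsetB S T)) ++ [S]

def minimal_sets_py (candidates : List (List Int)) : List (List Int) :=
  candidates.foldl aStep []

-- ===== PORT B =====
-- T < S (strict subset) and T == S (set equality) on Python sets
def strictSubB (T S : List Int) : Bool := subsetB T S && !subsetB S T
def setEqB (T S : List Int) : Bool := subsetB T S && subsetB S T

-- B's loop: `all` is the whole candidate list, `res` the result being built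
def altGo (all : List (List Int)) : List (List Int) → List (List Int) → List (List Int)
  | [], res => res
  | S :: rest, res =>
    if all.any (fun T => strictSubB T S) then altGo all rest res
    else if res.any (fun T => setEqB T S) then altGo all rest res
    else altGo all rest (res ++ [S])

def minimal_sets_py_alt (candidates : List (List Int)) : List (List Int) :=
  altGo candidates candidates []

-- ===== PRECONDITION & SPEC =====
def Spec_minimal_sets_py (candidates : List (List Int)) (out : List (List Int)) : Prop := out = minimal_sets_py_alt candidates
instance (candidates : List (List Int)) (out : List (List Int)) : Decidable (Spec_minimal_sets_py candidates out) := by unfold Spec_minimal_sets_py; infer_instance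

-- ===== CLAIM (what is proved, stated in full; the proofs are below) =====
def Claim_equal_minimal_sets_py : Prop := ∀ (candidates : List (List Int)), Dom_minimal_sets_py candidates → Spec_minimal_sets_py candidates (minimal_sets_py candidates)

-- ===== LEMMAS AND PROOFS =====

theorem subsetB_iff (T S : List Int) : subsetB T S = true ↔ ∀ x ∈ T, x ∈ S := by
  simp [subsetB]

theorem subsetB_refl (S : List Int) : subsetB S S = true := by
  simp [subsetB_iff]

theorem subsetB_trans {a b c : List Int} (h1 : subsetB a b = true)
    (h2 : subsetB b c = true) : subsetB a c = true := by
  rw [subsetB_iff] at *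
  exact fun x hx => h2 x (h1 x hx)

theorem strictSubB_self (S : List Int) : strictSubB S S = false := by
  simp [strictSubB, subsetB_refl]

-- set-equal elements behave identically under strictSubB from the left
theorem strictSubB_congr_right {S T x : List Int} (h : setEqB T x = true) :
    strictSubB S T = strictSubB S x := by
  simp only [setEqB, Bool.and_eq_true] at h
  simp only [strictSubB]
  have h1 : subsetB S T = subsetB S x := by
    cases hST : subsetB S T with
    | true => exact (subsetB_trans hST h.1).symm
    | false =>
      cases hSx : subsetB S x with
      | true => exact absurd (subsetB_trans hSx h.2) (by simp [hST])
      | false => rfl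
  have h2 : subsetB T S = subsetB x S := by
    cases hTS : subsetB T S with
    | true => exact (subsetB_trans h.2 hTS).symm
    | false =>
      cases hxS : subsetB x S with
      | true => exact absurd (subsetB_trans h.1 hxS) (by simp [hTS])
      | false => rfl
  rw [h1, h2]

theorem altGo_append (all l1 l2 res : List (List Int)) :
    altGo all (l1 ++ l2) res = altGo all l2 (altGo all l1 res) := by
  induction l1 generalizing res with
  | nil => rfl
  | cons S rest ih =>
    simp only [List.cons_append, altGo]
    split_ifs <;> exact ih _

-- every element of altGo's output is from res, or from the list and strict-minimal in `all`
theorem anyF {α : Type} {l : List α} {f : α → Bool} (h : l.any f = false) :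
    ∀ x ∈ l, f x = false := by
  intro x hx
  exact Bool.eq_false_iff.mpr (List.any_eq_false.mp h x hx)

theorem altGo_mem {all : List (List Int)} : ∀ (l res : List (List Int)) (x : List Int),
    x ∈ altGo all l res →
    x ∈ res ∨ (x ∈ l ∧ all.any (fun T => strictSubB T x) = false)
  | [], res, x, h => Or.inl h
  | S :: rest, res, x, h => by
    simp only [altGo] at h
    split_ifs at h with h1 h2
    · rcases altGo_mem rest res x h with h' | ⟨h', h''⟩
      · exact Or.inl h'
      · exact Or.inr ⟨List.mem_cons_of_mem _ h', h''⟩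
    · rcases altGo_mem rest res x h with h' | ⟨h', h''⟩
      · exact Or.inl h'
      · exact Or.inr ⟨List.mem_cons_of_mem _ h', h''⟩
    · rcases altGo_mem rest (res ++ [S]) x h with h' | ⟨h', h''⟩
      · rcases List.mem_append.mp h' with h' | h'
        · exact Or.inl h'
        · simp only [List.mem_singleton] at h'
          subst h'
          exact Or.inr ⟨List.mem_cons_self, by simpa using h1⟩
      · exact Or.inr ⟨List.mem_cons_of_mem _ h', h''⟩

-- A's accumulator always keeps a subset-representative of everything seen
def covers (out : List (List Int)) (U : List Int) : Prop :=
  ∃ T ∈ out, subsetB T U = true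

theorem covers_aStep {out : List (List Int)} {U : List Int} (S : List Int)
    (h : covers out U) : covers (aStep out S) U := by
  obtain ⟨T, hT, hTU⟩ := h
  unfold aStep
  split_ifs with h1
  · exact ⟨T, hT, hTU⟩
  · cases hST : subsetB S T with
    | true =>
      exact ⟨S, List.mem_append_right _ (List.mem_singleton.mpr rfl),
        subsetB_trans hST hTU⟩
    | false =>
      exact ⟨T, List.mem_append_left _ (List.mem_filter.mpr ⟨hT, by simp [hST]⟩), hTU⟩

theorem covers_aStep_self (out : List (List Int)) (S : List Int) :
    covers (aStep out S) S := by
  unfold aStep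
  split_ifs with h1
  · obtain ⟨T, hT, hTS⟩ := List.any_eq_true.mp h1
    exact ⟨T, hT, hTS⟩
  · exact ⟨S, List.mem_append_right _ (List.mem_singleton.mpr rfl), subsetB_refl S⟩

theorem aFold_covers : ∀ (l out : List (List Int)) (U : List Int),
    (covers out U ∨ U ∈ l) → covers (List.foldl aStep out l) U
  | [], out, U, h => by
    simpa using h.resolve_right (by simp)
  | S :: rest, out, U, h => by
    simp only [List.foldl_cons]
    apply aFold_covers rest
    rcases h with h | h
    · exact Or.inl (covers_aStep S h)
    · rcases List.mem_cons.mp h with h | h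
      · subst h; exact Or.inl (covers_aStep_self out U)
      · exact Or.inr h

-- key lemma: appending S to the global list filters the run by ¬(S ⊊ ·)
theorem altGo_snoc_all (p : List (List Int)) (S : List Int) :
    ∀ (l res : List (List Int)),
    altGo (p ++ [S]) l (res.filter (fun T => !strictSubB S T)) =
      (altGo p l res).filter (fun T => !strictSubB S T)
  | [], res => rfl
  | x :: rest, res => by
    have hany : (p ++ [S]).any (fun T => strictSubB T x)
        = (p.any (fun T => strictSubB T x) || strictSubB S x) := by
      simp
    simp only [altGo, hany]
    cases hp : p.any (fun T => strictSubB T x) with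
    | true =>
      simp only [Bool.true_or, if_true]
      exact altGo_snoc_all p S rest res
    | false =>
      cases hS : strictSubB S x with
      | true =>
        simp only [Bool.false_or, if_true]
        by_cases hd : res.any (fun T => setEqB T x) = true
        · simp only [hd, if_true]
          exact altGo_snoc_all p S rest res
        · simp only [Bool.not_eq_true] at hd
          simp only [hd, Bool.false_eq_true, if_false]
          have : (res ++ [x]).filter (fun T => !strictSubB S T)
              = res.filter (fun T => !strictSubB S T) := by
            simp [List.filter_append, hS]
          rw [← this]
          exact altGo_snoc_all p S rest (res ++ [x])
      | false =>
        simp only [Bool.false_or]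
        have hdedup : (res.filter (fun T => !strictSubB S T)).any (fun T => setEqB T x)
            = res.any (fun T => setEqB T x) := by
          cases hr : res.any (fun T => setEqB T x) with
          | true =>
            obtain ⟨T, hT, hTx⟩ := List.any_eq_true.mp hr
            apply List.any_eq_true.mpr
            refine ⟨T, List.mem_filter.mpr ⟨hT, ?_⟩, hTx⟩
            rw [strictSubB_congr_right hTx, hS]
            rfl
          | false =>
            apply List.any_eq_false.mpr
            intro T hT
            exact List.any_eq_false.mp hr T (List.mem_filter.mp hT).1
        rw [hdedup]
        by_cases hd : res.any (fun T => setEqB T x) = true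
        · simp only [hd, if_true]
          exact altGo_snoc_all p S rest res
        · simp only [Bool.not_eq_true] at hd
          simp only [hd, Bool.false_eq_true, if_false]
          have : (res ++ [x]).filter (fun T => !strictSubB S T)
              = res.filter (fun T => !strictSubB S T) ++ [x] := by
            simp [List.filter_append, hS]
          rw [← this]
          exact altGo_snoc_all p S rest (res ++ [x])

theorem main_eq : ∀ (p : List (List Int)),
    minimal_sets_py p = minimal_sets_py_alt p := by
  intro p
  induction p using List.reverseRecOn with
  | nil => rfl
  | append_singleton p S ih =>
    unfold minimal_sets_py minimal_sets_py_alt at *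
    rw [List.foldl_append, List.foldl_cons, List.foldl_nil, ih]
    rw [altGo_append]
    have hpref : altGo (p ++ [S]) p [] =
        (altGo p p []).filter (fun T => !strictSubB S T) := by
      have := altGo_snoc_all p S p []
      simpa using this
    rw [hpref]
    set out := altGo p p [] with hout
    -- facts about out
    have hE : ∀ x ∈ out, x ∈ p ∧ p.any (fun T => strictSubB T x) = false := by
      intro x hx
      rcases altGo_mem p [] x hx with h | h
      · simp at h
      · exact h
    have hM : ∀ U ∈ p, covers out U := by
      intro U hU
      have := aFold_covers p [] U (Or.inr hU)
      rwa [show List.foldl aStep [] p = out from ih] at this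
    -- unfold the single B-step on S
    have hSS : (p ++ [S]).any (fun T => strictSubB T S)
        = p.any (fun T => strictSubB T S) := by
      simp [strictSubB_self]
    simp only [altGo, hSS]
    unfold aStep
    by_cases hα : out.any (fun T => subsetB T S) = true
    · -- A skips S; out is unchanged on both sides
      obtain ⟨T, hT, hTS⟩ := List.any_eq_true.mp hα
      have hfilter : out.filter (fun T => !strictSubB S T) = out := by
        apply List.filter_eq_self.mpr
        intro U hU
        cases hSU : strictSubB S U with
        | false => rfl
        | true =>
          exfalso
          simp only [strictSubB, Bool.and_eq_true, Bool.not_eq_true'] at hSU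
          have hUT : subsetB U T = false := by
            cases h : subsetB U T with
            | false => rfl
            | true => exact absurd (subsetB_trans h hTS) (by simp [hSU.2])
          have hTU : strictSubB T U = true := by
            simp only [strictSubB, Bool.and_eq_true, Bool.not_eq_true']
            exact ⟨subsetB_trans hTS hSU.1, hUT⟩
          have hcontra := anyF (hE U hU).2 T (hE T hT).1
          rw [hTU] at hcontra
          simp at hcontra
      rw [if_pos hα, hfilter]
      cases hpAny : p.any (fun T => strictSubB T S) with
      | true => simp
      | false =>
        simp only [Bool.false_eq_true, if_false]
        have hST : subsetB S T = true := by
          cases h : subsetB S T with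
          | true => rfl
          | false =>
            exfalso
            have hTstrict : strictSubB T S = true := by
              simp [strictSubB, hTS, h]
            have hcontra := anyF hpAny T (hE T hT).1
            rw [hTstrict] at hcontra
            simp at hcontra
        have hdd : out.any (fun T => setEqB T S) = true :=
          List.any_eq_true.mpr ⟨T, hT, by simp [setEqB, hTS, hST]⟩
        rw [if_pos hdd]
    · -- A keeps S (after pruning); B keeps S too
      have hα' : out.any (fun T => subsetB T S) = false := Bool.eq_false_iff.mpr hα
      have hnone : ∀ T ∈ out, subsetB T S = false := anyF hα'
      have hpAny : p.any (fun T => strictSubB T S) = false := by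
        apply List.any_eq_false.mpr
        intro U hU
        simp only [Bool.not_eq_true]
        cases hUS : strictSubB U S with
        | false => rfl
        | true =>
          exfalso
          simp only [strictSubB, Bool.and_eq_true, Bool.not_eq_true'] at hUS
          obtain ⟨T, hT, hTU⟩ := hM U hU
          have hcontra := hnone T hT
          rw [subsetB_trans hTU hUS.1] at hcontra
          simp at hcontra
      have hdd : (out.filter (fun T => !strictSubB S T)).any (fun T => setEqB T S)
          = false := by
        apply List.any_eq_false.mpr
        intro T hT
        simp only [Bool.not_eq_true]
        have hTo := (List.mem_filter.mp hT).1
        cases hTq : setEqB T S with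
        | false => rfl
        | true =>
          exfalso
          simp only [setEqB, Bool.and_eq_true] at hTq
          have hcontra := hnone T hTo
          rw [hTq.1] at hcontra
          simp at hcontra
      have hfc : out.filter (fun T => !subsetB S T)
          = out.filter (fun T => !strictSubB S T) := by
        apply List.filter_congr
        intro T hT
        simp [strictSubB, hnone T hT]
      rw [if_neg hα, if_neg (by simp [hpAny]), if_neg (by simp [hdd]), hfc]

-- ===== VERDICT (by name: the statement is the Claim_ definition above) =====
theorem minimal_sets_py_spec : Claim_equal_minimal_sets_py := by
  intro candidates _
  exact main_eq candidates
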